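-- pv_equiv track=rewrite | github.com/TracecatHQ/tracecat | registry/tracecat_registry/core/python.py | _extract_user_friendly_error
-- ===== SOURCE A (Python) =====
-- def _extract_user_friendly_error(error_msg: str) -> str:
--     """
--     Extract a clean, user-friendly error message from Python tracebacks.
--
--     This extracts just the Python error representation (e.g., "ValueError: some_msg")
--     without the technical traceback details that are not useful for end users
--     in a no-code platform.
--
--     Args:
--         error_msg: The raw error message, potentially containing a full traceback.
--
--     Returns:
--         A clean error message suitable for end users.
--     """
--     if "PythonError:" not in error_msg:
--         return error_msg
--
--     # Split into lines and process in reverse (exception is usually at the end)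
--     lines = [line.strip() for line in error_msg.split("\n") if line.strip()]
--
--     for line in reversed(lines):
--         # Skip traceback-related lines
--         match line:
--             case line if line.startswith(("File ", "  ", "Traceback")):
--                 continue
--             case line if ":" not in line:
--                 continue
--             case _:
--                 # If it has the format "SomethingError: message", it's likely a Python exception
--                 exception_type = line.split(":", 1)[0].strip()
--                 if exception_type.endswith(("Error", "Exception")):
--                     return line
--
--     # Fallback to original message if no clean exception found
--     return error_msg
-- ===== SOURCE B (Python) =====
-- def _extract_user_friendly_error(error_msg: str) -> str:
--     # Single forward pass with a last-match accumulator; no intermediate list, no reversal.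
--     if "PythonError:" not in error_msg:
--         return error_msg
--     result = error_msg
--     for raw in error_msg.split("\n"):
--         line = raw.strip()
--         if not line:
--             continue
--         if line.startswith(("File ", "  ", "Traceback")):
--             continue
--         if ":" not in line:
--             continue
--         if line.split(":", 1)[0].strip().endswith(("Error", "Exception")):
--             result = line
--     return result
-- ===== Notes on version B (the rewrite author's own statement) =====
-- stated objective: simpler
-- what changed: Replaced the build-list-then-scan-reversed-with-early-return structure by a single forward pass over the raw split lines that strips, filters and tests each line inline and keeps the last matching line in an accumulator (last forward match = first reverse match).
import Mathlib
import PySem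

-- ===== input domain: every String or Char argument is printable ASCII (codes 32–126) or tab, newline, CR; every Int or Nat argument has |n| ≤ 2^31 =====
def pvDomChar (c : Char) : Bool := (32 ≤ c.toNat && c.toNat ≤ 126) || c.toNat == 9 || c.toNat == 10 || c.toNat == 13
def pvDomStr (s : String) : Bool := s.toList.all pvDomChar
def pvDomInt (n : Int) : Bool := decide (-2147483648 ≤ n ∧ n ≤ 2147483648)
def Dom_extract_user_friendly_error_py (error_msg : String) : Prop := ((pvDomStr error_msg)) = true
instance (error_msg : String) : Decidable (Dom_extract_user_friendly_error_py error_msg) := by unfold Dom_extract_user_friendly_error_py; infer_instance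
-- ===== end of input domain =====

-- B replaces A's build-list / reverse-scan / early-return shape by one forward pass
-- keeping the last matching line in an accumulator (objective: simpler).

-- ===== PORT A =====
-- the reversed early-return loop of A ('for line in reversed(lines): …'); fallback = error_msg
def pvLinesLoopA (fallback : String) : List String → String
  | [] => fallback
  | line :: rest =>
    if PySem.Str.startswith line "File " || PySem.Str.startswith line "  "
        || PySem.Str.startswith line "Traceback" then
      pvLinesLoopA fallback rest
    else if !(PySem.Str.isIn ":" line) then
      pvLinesLoopA fallback rest
    else
      let exception_type := PySem.Str.strip (((PySem.Str.splitMax? line ":" 1).getD []).headD "")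
      if PySem.Str.endswith exception_type "Error" || PySem.Str.endswith exception_type "Exception" then
        line
      else
        pvLinesLoopA fallback rest

def extract_user_friendly_error_py (error_msg : String) : String :=
  if !(PySem.Str.isIn "PythonError:" error_msg) then error_msg
  else
    let lines := (((PySem.Str.split? error_msg "\n").getD []).map PySem.Str.strip).filter
      (fun line => line ≠ "")
    pvLinesLoopA error_msg lines.reverse

-- ===== PORT B =====
def extract_user_friendly_error_py_alt (error_msg : String) : String :=
  if !(PySem.Str.isIn "PythonError:" error_msg) then error_msg
  else
    ((PySem.Str.split? error_msg "\n").getD []).foldl (fun result raw =>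
      let line := PySem.Str.strip raw
      if line = "" then result
      else if PySem.Str.startswith line "File " || PySem.Str.startswith line "  "
          || PySem.Str.startswith line "Traceback" then result
      else if !(PySem.Str.isIn ":" line) then result
      else if PySem.Str.endswith (PySem.Str.strip (((PySem.Str.splitMax? line ":" 1).getD []).headD "")) "Error"
          || PySem.Str.endswith (PySem.Str.strip (((PySem.Str.splitMax? line ":" 1).getD []).headD "")) "Exception" then
        line
      else result) error_msg

-- ===== PRECONDITION & SPEC =====
def Spec_extract_user_friendly_error_py (error_msg : String) (out : String) : Prop := out = extract_user_friendly_error_py_alt error_msg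
instance (error_msg : String) (out : String) : Decidable (Spec_extract_user_friendly_error_py error_msg out) := by unfold Spec_extract_user_friendly_error_py; infer_instance

-- ===== CLAIM (what is proved, stated in full; the proofs are below) =====
def Claim_equal_extract_user_friendly_error_py : Prop := ∀ (error_msg : String), Dom_extract_user_friendly_error_py error_msg → Spec_extract_user_friendly_error_py error_msg (extract_user_friendly_error_py error_msg)

-- ===== LEMMAS AND PROOFS =====

-- the shared line test, used only by the proofs
def pvMatch (line : String) : Bool :=
  !(PySem.Str.startswith line "File " || PySem.Str.startswith line "  "
      || PySem.Str.startswith line "Traceback")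
  && PySem.Str.isIn ":" line
  && (PySem.Str.endswith (PySem.Str.strip (((PySem.Str.splitMax? line ":" 1).getD []).headD "")) "Error"
      || PySem.Str.endswith (PySem.Str.strip (((PySem.Str.splitMax? line ":" 1).getD []).headD "")) "Exception")

lemma pvMatch_empty : pvMatch "" = false := by decide

-- A's loop returns the first pvMatch line, else the fallback
lemma pvLinesLoopA_eq_find (fallback : String) (l : List String) :
    pvLinesLoopA fallback l = (l.find? pvMatch).getD fallback := by
  induction l with
  | nil => rfl
  | cons line rest ih =>
    rw [List.find?_cons]
    rcases Bool.eq_false_or_eq_true (pvMatch line) with hm | hm <;>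
      rw [hm] <;>
      unfold pvMatch at hm <;>
      simp only [Bool.and_eq_true, Bool.and_eq_false_iff, Bool.or_eq_true,
        Bool.not_eq_eq_eq_not, Bool.not_true] at hm <;>
      simp only [pvLinesLoopA] <;>
      split_ifs with h1 h2 h3 <;>
      simp_all [Bool.or_eq_true]

-- B's fold is a last-match accumulator: it returns the first match of the reversed stripped list
lemma foldl_lastMatch_strip (raws : List String) (init : String) :
    raws.foldl (fun result raw =>
        if pvMatch (PySem.Str.strip raw) then PySem.Str.strip raw else result) init
      = ((raws.map PySem.Str.strip).reverse.find? pvMatch).getD init := by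
  induction raws generalizing init with
  | nil => rfl
  | cons raw rest ih =>
    simp only [List.foldl_cons, List.map_cons, List.reverse_cons, List.find?_append, ih]
    cases h : (rest.map PySem.Str.strip).reverse.find? pvMatch with
    | none => by_cases h2 : pvMatch (PySem.Str.strip raw) = true <;> simp [h2]
    | some y => simp

-- lines that fail the truthiness filter cannot match (pvMatch "" = false)
lemma find?_filter_ne_empty (l : List String) :
    (l.filter (fun line => line ≠ "")).find? pvMatch = l.find? pvMatch := by
  induction l with
  | nil => rfl
  | cons x xs ih =>
    by_cases hx : x = ""
    · subst hx
      rw [List.filter_cons_of_neg (by simp)]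
      simp only [List.find?_cons, pvMatch_empty]
      exact ih
    · rw [List.filter_cons_of_pos (by simp [hx])]
      simp only [List.find?_cons]
      cases pvMatch x
      · exact ih
      · rfl

-- B's folding step written with its four guards equals the single pvMatch test
lemma stepB_eq : (fun (result raw : String) =>
      let line := PySem.Str.strip raw
      if line = "" then result
      else if PySem.Str.startswith line "File " || PySem.Str.startswith line "  "
          || PySem.Str.startswith line "Traceback" then result
      else if !(PySem.Str.isIn ":" line) then result
      else if PySem.Str.endswith (PySem.Str.strip (((PySem.Str.splitMax? line ":" 1).getD []).headD "")) "Error"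
          || PySem.Str.endswith (PySem.Str.strip (((PySem.Str.splitMax? line ":" 1).getD []).headD "")) "Exception" then
        line
      else result)
    = (fun result raw => if pvMatch (PySem.Str.strip raw) then PySem.Str.strip raw else result) := by
  funext result raw
  simp only []
  by_cases h0 : PySem.Str.strip raw = ""
  · simp [h0, pvMatch_empty]
  · simp only [h0, if_false, pvMatch]
    split_ifs with h1 h2 h3 <;> simp_all [Bool.or_eq_true]

-- ===== VERDICT (by name: the statement is the Claim_ definition above) =====
theorem extract_user_friendly_error_py_spec : Claim_equal_extract_user_friendly_error_py := by
  intro error_msg _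
  unfold Spec_extract_user_friendly_error_py
  unfold extract_user_friendly_error_py extract_user_friendly_error_py_alt
  by_cases hg : PySem.Str.isIn "PythonError:" error_msg = true
  · rw [hg]
    simp only [Bool.not_true, Bool.false_eq_true, if_false]
    rw [stepB_eq, pvLinesLoopA_eq_find, foldl_lastMatch_strip, ← List.filter_reverse,
      find?_filter_ne_empty]
  · rw [Bool.not_eq_true] at hg
    rw [hg]
    simp
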